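-- pv_equiv track=rewrite | github.com/The-King-12345/Advent-of-Code | 2024/day09/main.py | count_size
-- ===== SOURCE A (Python) =====
-- def count_size(filesystem: list[str], id: int) -> tuple[int,int]:
--     res = 0
--     target = str(id)
--     found = False
--
--     for i, char in enumerate(reversed(filesystem)):
--         if not found:
--             if char == target:
--                 found = True
--                 res += 1
--         else:
--             if char == target:
--                 res += 1
--             else:
--                 return len(filesystem)-i, res
--
--     return 0, res
-- ===== SOURCE B (Python) =====
-- def count_size(filesystem: list[str], id: int) -> tuple[int, int]:
--     target = str(id)
--     start, length = 0, 0
--     prev = False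
--     for i, char in enumerate(filesystem):
--         if char == target:
--             if prev:
--                 length += 1
--             else:
--                 start, length = i, 1
--             prev = True
--         else:
--             prev = False
--     return (start, length)
-- ===== Notes on version B (the rewrite author's own statement) =====
-- stated objective: alternative
-- what changed: Replaced A's backward scan (reversed list, found-flag, early return mid-loop) by a single FORWARD pass that records the start index and length of the most recent run of the target, which at the end is exactly the rightmost run; no reversed copy, no flag-gated early exit, and the no-match case falls out as (0,0) naturally.
import Mathlib
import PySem

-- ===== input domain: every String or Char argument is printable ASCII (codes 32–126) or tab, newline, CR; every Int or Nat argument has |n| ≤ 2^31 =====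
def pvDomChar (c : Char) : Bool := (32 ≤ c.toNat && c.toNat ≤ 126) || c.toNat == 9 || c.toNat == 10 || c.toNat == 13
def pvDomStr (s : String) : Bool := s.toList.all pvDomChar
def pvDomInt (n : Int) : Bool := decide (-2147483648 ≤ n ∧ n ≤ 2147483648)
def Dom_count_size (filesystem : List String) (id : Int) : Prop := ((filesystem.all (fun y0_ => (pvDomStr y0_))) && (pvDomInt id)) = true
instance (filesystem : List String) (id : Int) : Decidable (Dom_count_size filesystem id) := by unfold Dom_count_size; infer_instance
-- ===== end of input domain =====

-- B replaces A's backward scan (reversed list, found flag, early return) by one forward pass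
-- recording the start and length of the most recent run of the target; objective: alternative.

-- ===== PORT A =====
-- A's loop over enumerate(reversed(filesystem)): i counter, res accumulator, found flag;
-- early return (len(filesystem)-i, res) when the run ends.
def goA (t : String) (n : Int) : List String → Int → Int → Bool → Int × Int
  | [], _, res, _ => (0, res)
  | c :: cs, i, res, found =>
    if !found then
      if c = t then goA t n cs (i + 1) (res + 1) true
      else goA t n cs (i + 1) res false
    else
      if c = t then goA t n cs (i + 1) (res + 1) true
      else (n - i, res)

def count_size (filesystem : List String) (id : Int) : Int × Int :=
  goA (PySem.Int.toStr id) filesystem.length filesystem.reverse 0 0 false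

-- ===== PORT B =====
-- Source B's forward loop: state (start, length, prev) over enumerate(filesystem)
def goB (t : String) : List String → Int → (Int × Int) × Bool → (Int × Int) × Bool
  | [], _, st => st
  | c :: cs, i, ((s, l), prev) =>
    if c = t then
      if prev then goB t cs (i + 1) ((s, l + 1), true)
      else goB t cs (i + 1) ((i, 1), true)
    else goB t cs (i + 1) ((s, l), false)

def count_size_alt (filesystem : List String) (id : Int) : Int × Int :=
  (goB (PySem.Int.toStr id) filesystem 0 ((0, 0), false)).1

-- ===== PRECONDITION & SPEC =====
def Spec_count_size (filesystem : List String) (id : Int) (out : Int × Int) : Prop := out = count_size_alt filesystem id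
instance (filesystem : List String) (id : Int) (out : Int × Int) : Decidable (Spec_count_size filesystem id out) := by unfold Spec_count_size; infer_instance

-- ===== CLAIM (what is proved, stated in full; the proofs are below) =====
def Claim_equal_count_size : Prop := ∀ (filesystem : List String) (id : Int), Dom_count_size filesystem id → Spec_count_size filesystem id (count_size filesystem id)

-- ===== LEMMAS AND PROOFS =====

-- proof-only helpers over the reversed list r: k = length of the non-matching prefix of r,
-- skipB = the tail of r starting at its first match, runB = length of the leading run
def kB (t : String) : List String → Nat
  | [] => 0
  | c :: cs => if c ≠ t then kB t cs + 1 else 0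

def runB (t : String) : List String → Int
  | [] => 0
  | c :: cs => if c = t then runB t cs + 1 else 0

def skipB (t : String) : List String → List String
  | [] => []
  | c :: cs => if c ≠ t then skipB t cs else c :: cs

theorem skipB_len (t : String) (r : List String) :
    (skipB t r).length + kB t r = r.length := by
  induction r with
  | nil => simp [kB, skipB]
  | cons c cs ih =>
    by_cases hc : c = t
    · simp [kB, skipB, hc]
    · simp only [kB, skipB, hc, ne_eq, not_false_eq_true, if_true, List.length_cons]
      omega

theorem skipB_head (t : String) (r : List String) (c : String) (cs : List String)
    (h : skipB t r = c :: cs) : c = t := by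
  induction r with
  | nil => simp [skipB] at h
  | cons d ds ih =>
    simp only [skipB] at h
    split at h
    · exact ih h
    · rename_i hd
      obtain ⟨rfl, rfl⟩ := List.cons.injEq .. ▸ h
      simpa using hd

theorem skipB_nil_runB (t : String) (cs : List String) (h : skipB t cs = []) :
    runB t cs = 0 := by
  cases cs with
  | nil => simp [runB]
  | cons d ds =>
    simp only [skipB] at h
    split at h
    · rename_i hd; simp only [ne_eq, not_not] at hd
      simp [runB, fun hh => hd hh]
    · exact absurd h (by simp)

theorem kB_pos_runB (t : String) (cs : List String) (h : kB t cs ≠ 0) :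
    runB t cs = 0 := by
  cases cs with
  | nil => simp [runB]
  | cons d ds =>
    by_cases hd : d = t
    · simp [kB, hd] at h
    · simp [runB, hd]

theorem kB_zero_skip (t : String) (cs : List String) (h0 : cs ≠ []) (h : kB t cs = 0) :
    skipB t cs = cs := by
  cases cs with
  | nil => simp at h0
  | cons d ds =>
    by_cases hd : d = t
    · simp [skipB, hd]
    · simp [kB, hd] at h

-- A's not-found phase skips the non-matching prefix, advancing the counter
theorem goA_notfound (t : String) (n : Int) (r : List String) :
    ∀ i : Int, goA t n r i 0 false =
      goA t n (skipB t r) (i + (r.length : Int) - ((skipB t r).length : Int)) 0 false := by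
  induction r with
  | nil => intro i; simp [skipB]
  | cons c cs ih =>
    intro i
    by_cases hc : c = t
    · rw [show skipB t (c :: cs) = c :: cs from by simp [skipB, hc]]
      have h2 : i + ((c :: cs).length : Int) - ((c :: cs).length : Int) = i := by ring
      rw [h2]
    · simp only [goA, Bool.not_false, skipB, ne_eq, hc, not_false_eq_true, if_true, if_false,
        ih (i + 1), List.length_cons]
      have h2 : i + 1 + ((cs.length : Int)) - (((skipB t cs).length : Int))
           = i + (((cs.length : Nat) + 1 : Nat) : Int) - (((skipB t cs).length : Int)) := by
        push_cast; ring
      rw [h2]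

-- A's found phase: returns the run length and (if the run stops inside the list) the stop position
theorem goA_found (t : String) (n : Int) (cs : List String) :
    ∀ i res : Int, goA t n cs i res true =
      if runB t cs = (cs.length : Int) then (0, res + runB t cs)
      else (n - (i + runB t cs), res + runB t cs) := by
  induction cs with
  | nil => intro i res; simp [goA, runB]
  | cons c cs ih =>
    intro i res
    by_cases hc : c = t
    · subst hc
      simp only [goA, Bool.not_true, Bool.false_eq_true, if_false, ih, runB,
        List.length_cons]
      push_cast
      split_ifs with h1 h2 h3 <;> simp only [Prod.mk.injEq] <;> constructor <;>
        first | trivial | omega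
    · simp only [goA, Bool.not_true, Bool.false_eq_true, if_false, if_neg hc, runB,
        List.length_cons]
      have h0 : (0 : Int) ≤ (cs.length : Int) := by positivity
      rw [if_neg (by push_cast; omega)]
      simp only [Prod.mk.injEq]
      constructor <;> omega

-- A's result, characterised by the reversed list r = filesystem.reverse
theorem goA_char (t : String) (fs : List String) :
    goA t fs.length fs.reverse 0 0 false =
      ((fs.length : Int) - kB t fs.reverse - runB t (skipB t fs.reverse),
        runB t (skipB t fs.reverse)) := by
  rw [goA_notfound]
  have hlen : (skipB t fs.reverse).length + kB t fs.reverse = fs.reverse.length :=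
    skipB_len t fs.reverse
  have hn : fs.reverse.length = fs.length := by simp
  rcases hsk : skipB t fs.reverse with _ | ⟨c, cs⟩
  · rw [hsk] at hlen
    simp only [hsk, goA, runB, List.length_nil, Nat.zero_add] at *
    simp only [Prod.mk.injEq]
    constructor <;> omega
  · have hc : c = t := skipB_head t fs.reverse c cs hsk
    subst hc
    rw [hsk] at hlen
    simp only [goA, Bool.not_false, if_true, goA_found, runB, List.length_cons]
    simp only [List.length_cons] at hlen
    have hr : (0 : Int) ≤ runB c cs := by
      clear hlen hsk
      induction cs with
      | nil => simp [runB]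
      | cons d ds ih => by_cases hd : d = c <;> simp [runB, hd] <;> omega
    split_ifs with h1 <;> simp only [Prod.mk.injEq] <;>
      push_cast [List.length_cons] <;> constructor <;> first | trivial | omega

-- B's loop composes over append
theorem goB_append (t : String) (l1 l2 : List String) :
    ∀ (i : Int) (st : (Int × Int) × Bool),
      goB t (l1 ++ l2) i st = goB t l2 (i + (l1.length : Int)) (goB t l1 i st) := by
  induction l1 with
  | nil => intro i st; simp [goB]
  | cons c cs ih =>
    intro i st
    obtain ⟨⟨s, l⟩, prev⟩ := st
    simp only [List.cons_append, goB, List.length_cons]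
    split_ifs <;> rw [ih] <;> congr 1 <;> push_cast <;> ring

-- B's full state after a forward pass, characterised by the reversed list r
theorem goB_char (t : String) (r : List String) :
    goB t r.reverse 0 ((0, 0), false) =
      if skipB t r = [] then ((0, 0), false)
      else (((r.length : Int) - kB t r - runB t (skipB t r), runB t (skipB t r)),
            decide (kB t r = 0)) := by
  induction r with
  | nil => simp [goB, skipB]
  | cons c cs ih =>
    rw [show (c :: cs).reverse = cs.reverse ++ [c] from by simp,
        goB_append, ih]
    by_cases hc : c = t
    · -- new head matches: run extends or restarts
      subst hc
      have hskc : skipB c (c :: cs) = c :: cs := by simp [skipB]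
      have hkc : kB c (c :: cs) = 0 := by simp [kB]
      have hrun : runB c (c :: cs) = runB c cs + 1 := by simp [runB]
      rw [hskc, hkc, hrun, if_neg (show ¬(c :: cs = []) by simp)]
      by_cases hsk : skipB c cs = []
      · have hr0 : runB c cs = 0 := skipB_nil_runB c cs hsk
        have hk : kB c cs = cs.length := by
          have := skipB_len c cs; rw [hsk] at this; simpa using this
        rw [if_pos hsk]
        simp only [goB, if_pos rfl, Bool.false_eq_true, if_false, List.length_reverse,
          hr0, List.length_cons, if_true, Prod.mk.injEq]
        refine ⟨⟨by push_cast; omega, by omega⟩, by simp⟩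
      · rw [if_neg hsk]
        by_cases hk0 : kB c cs = 0
        · have hse : skipB c cs = cs := kB_zero_skip c cs (by rintro rfl; simp [skipB] at hsk) hk0
          simp only [goB, if_pos rfl, hk0, decide_true, if_true, List.length_reverse,
            hse, Prod.mk.injEq, List.length_cons]
          refine ⟨⟨by push_cast; ring, by simp⟩, by simp⟩
        · have hr0 : runB c cs = 0 := kB_pos_runB c cs hk0
          simp only [goB, if_pos rfl, decide_eq_true_eq, hk0, if_false, List.length_reverse,
            hr0, List.length_cons, if_true, Prod.mk.injEq]
          refine ⟨⟨by push_cast; omega, by omega⟩, by simp⟩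
    · -- new head does not match: state carried through, prev reset
      have hskc : skipB t (c :: cs) = skipB t cs := by simp [skipB, hc]
      have hkc : kB t (c :: cs) = kB t cs + 1 := by simp [kB, hc]
      rw [hskc, hkc]
      by_cases hsk : skipB t cs = []
      · simp [hsk, goB, hc]
      · rw [if_neg hsk, if_neg hsk]
        simp only [goB, hc, if_false, List.length_reverse, Prod.mk.injEq, List.length_cons]
        refine ⟨⟨by push_cast; ring, by simp⟩, by simp⟩

-- ===== VERDICT (by name: the statement is the Claim_ definition above) =====
theorem count_size_spec : Claim_equal_count_size := by
  intro fs id _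
  simp only [Spec_count_size, count_size, count_size_alt]
  set t := PySem.Int.toStr id with ht
  rw [goA_char, show fs = fs.reverse.reverse from by simp, goB_char]
  simp only [List.reverse_reverse, List.length_reverse]
  by_cases hsk : skipB t fs.reverse = []
  · have hk : kB t fs.reverse = fs.reverse.length := by
      have := skipB_len t fs.reverse; rw [hsk] at this; simpa using this
    have hn : fs.reverse.length = fs.length := by simp
    rw [if_pos hsk]
    simp only [hsk, hk, runB, Prod.mk.injEq]
    exact ⟨by omega, trivial⟩
  · rw [if_neg hsk]
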